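-- pv_equiv track=rewrite | github.com/bigdnguyen/Lab9 | encode.py | decode_password
-- ===== SOURCE A (Python) =====
-- def decode_password(password):
--     if len(password) != 8 or not password.isdigit():
--         return "Invalid password format."
--
--     decoded_password = ""
--     for digit in password:
--         new_digit = str((int(digit) - 3) % 10)
--         decoded_password += new_digit
--
--     return decoded_password
-- ===== SOURCE B (Python) =====
-- def decode_password(password):
--     if len(password) != 8 or not password.isdigit():
--         return "Invalid password format."
--     # Pack the whole password into one integer (Horner), then peel its
--     # digits off right-to-left with divmod, shifting each by +7 mod 10
--     # (== -3 mod 10), and assemble the result back-to-front.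
--     n = 0
--     for ch in password:
--         n = n * 10 + (ord(ch) - 48)
--     out = []
--     for _ in range(8):
--         n, d = divmod(n, 10)
--         out.append(chr(48 + (d + 7) % 10))
--     return ''.join(reversed(out))
-- ===== Notes on version B (the rewrite author's own statement) =====
-- stated objective: alternative
-- what changed: Instead of A's left-to-right per-character string arithmetic (str((int(c)-3)%10) appended to an accumulator), B packs the whole password into a single integer by Horner's rule, then extracts its digits right-to-left with divmod, shifts each by +7 mod 10 (= -3 mod 10), and builds the output back-to-front.
import Mathlib
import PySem

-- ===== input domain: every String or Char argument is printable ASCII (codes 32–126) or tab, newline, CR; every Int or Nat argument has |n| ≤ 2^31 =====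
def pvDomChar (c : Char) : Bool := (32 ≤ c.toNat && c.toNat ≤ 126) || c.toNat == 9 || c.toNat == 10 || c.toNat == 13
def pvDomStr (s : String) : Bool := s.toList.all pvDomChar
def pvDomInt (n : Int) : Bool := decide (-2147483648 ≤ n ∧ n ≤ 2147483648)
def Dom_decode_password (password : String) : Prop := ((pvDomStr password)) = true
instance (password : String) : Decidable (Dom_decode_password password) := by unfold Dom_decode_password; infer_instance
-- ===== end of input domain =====

-- B packs the password into one integer by Horner's rule and peels its digits off right-to-left with divmod (+7 mod 10), building the output back-to-front (alternative algorithm; return value only).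


-- ===== PORT A =====
-- str.isdigit() on ASCII strings: nonempty and every char is an ASCII digit (exact on Dom).
def pyStrIsdigit (cs : List Char) : Bool := !cs.isEmpty && cs.all PySem.Chars.isdigit

def decode_password (password : String) : String :=
  if password.toList.length ≠ 8 ∨ ¬ pyStrIsdigit password.toList then
    "Invalid password format."
  else
    -- for digit in password: decoded_password += str((int(digit) - 3) % 10)
    String.ofList (password.toList.foldl
      (fun acc digit =>
        acc ++ PySem.Int.toChars (PySem.Int.mod ((PySem.Int.ofChars? [digit]).getD 0 - 3) 10))
      [])

-- ===== PORT B =====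
def decode_password_alt (password : String) : String :=
  if password.toList.length ≠ 8 ∨ ¬ pyStrIsdigit password.toList then
    "Invalid password format."
  else
    -- n = 0; for ch in password: n = n * 10 + (ord(ch) - 48)
    let n0 : Int := password.toList.foldl (fun n ch => n * 10 + ((ch.toNat : Int) - 48)) 0
    -- out = []; for _ in range(8): n, d = divmod(n, 10); out.append(chr(48 + (d + 7) % 10))
    let st := (List.range 8).foldl
      (fun (st : Int × List Char) (_ : Nat) =>
        (PySem.Int.floordiv st.1 10,
         st.2 ++ [Char.ofNat (48 + (PySem.Int.mod (PySem.Int.mod st.1 10 + 7) 10).toNat)]))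
      (n0, [])
    -- return ''.join(reversed(out))
    String.ofList st.2.reverse

-- ===== PRECONDITION & SPEC =====
def Spec_decode_password (password : String) (out : String) : Prop := out = decode_password_alt password
instance (password : String) (out : String) : Decidable (Spec_decode_password password out) := by unfold Spec_decode_password; infer_instance

-- ===== CLAIM (what is proved, stated in full; the proofs are below) =====
def Claim_equal_decode_password : Prop := ∀ (password : String), Dom_decode_password password → Spec_decode_password password (decode_password password)

-- ===== LEMMAS AND PROOFS =====

-- the numeric value of one digit character
def pvDigit (c : Char) : Int := (c.toNat : Int) - 48

-- the decoded character for one input digit character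
def pvPhi (c : Char) : Char := Char.ofNat (48 + (PySem.Int.mod (pvDigit c + 7) 10).toNat)

-- Horner value of a digit string (B's first loop)
def pvVal (cs : List Char) : Int := cs.foldl (fun n ch => n * 10 + ((ch.toNat : Int) - 48)) 0

-- one iteration of B's second loop
def pvG (st : Int × List Char) : Int × List Char :=
  (PySem.Int.floordiv st.1 10,
   st.2 ++ [Char.ofNat (48 + (PySem.Int.mod (PySem.Int.mod st.1 10 + 7) 10).toNat)])

theorem pvDigit_bounds (c : Char) (h : PySem.Chars.isdigit c = true) :
    0 ≤ pvDigit c ∧ pvDigit c < 10 := by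
  have hn : 48 ≤ c.toNat ∧ c.toNat ≤ 57 := by
    simpa [PySem.Chars.isdigit, Char.le_def, UInt32.le_iff_toNat_le] using h
  unfold pvDigit
  omega

-- A's per-character arithmetic produces exactly the character pvPhi c
theorem pv_step_eq (c : Char) (h : PySem.Chars.isdigit c = true) :
    PySem.Int.toChars (PySem.Int.mod ((PySem.Int.ofChars? [c]).getD 0 - 3) 10) = [pvPhi c] := by
  have hn : 48 ≤ c.toNat ∧ c.toNat ≤ 57 := by
    simpa [PySem.Chars.isdigit, Char.le_def, UInt32.le_iff_toNat_le] using h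
  rcases (show c.toNat = 48 ∨ c.toNat = 49 ∨ c.toNat = 50 ∨ c.toNat = 51 ∨ c.toNat = 52 ∨
      c.toNat = 53 ∨ c.toNat = 54 ∨ c.toNat = 55 ∨ c.toNat = 56 ∨ c.toNat = 57 by omega)
    with h'|h'|h'|h'|h'|h'|h'|h'|h'|h' <;>
    (rw [← Char.ofNat_toNat c, h']; decide)

-- A's fold of per-character concatenations is the map through pvPhi
theorem pv_fold_eq (cs : List Char) (h : ∀ x ∈ cs, PySem.Chars.isdigit x = true) (acc : List Char) :
    cs.foldl
      (fun acc digit =>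
        acc ++ PySem.Int.toChars (PySem.Int.mod ((PySem.Int.ofChars? [digit]).getD 0 - 3) 10))
      acc
    = acc ++ cs.map pvPhi := by
  induction cs generalizing acc with
  | nil => simp
  | cons c cs ih =>
    simp only [List.forall_mem_cons] at h
    simp only [List.foldl_cons, List.map_cons]
    rw [ih h.2, pv_step_eq c h.1, List.append_assoc]
    rfl

theorem pvVal_nonneg_aux (cs : List Char) (h : ∀ x ∈ cs, PySem.Chars.isdigit x = true)
    (a : Int) (ha : 0 ≤ a) :
    0 ≤ cs.foldl (fun n ch => n * 10 + ((ch.toNat : Int) - 48)) a := by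
  induction cs generalizing a with
  | nil => simpa using ha
  | cons c cs ih =>
    simp only [List.forall_mem_cons] at h
    have hb := pvDigit_bounds c h.1
    unfold pvDigit at hb
    exact ih h.2 _ (by nlinarith [hb.1, ha])

theorem pvVal_nonneg (cs : List Char) (h : ∀ x ∈ cs, PySem.Chars.isdigit x = true) :
    0 ≤ pvVal cs := pvVal_nonneg_aux cs h 0 le_rfl

theorem pvVal_append (cs : List Char) (c : Char) :
    pvVal (cs ++ [c]) = pvVal cs * 10 + pvDigit c := by
  unfold pvVal pvDigit
  rw [List.foldl_append]
  rfl

-- one divmod step of B's second loop undoes one Horner step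
theorem pvG_step (w d : Int) (acc : List Char) (_hw : 0 ≤ w) (hd0 : 0 ≤ d) (hd : d < 10) :
    pvG (w * 10 + d, acc) = (w, acc ++ [Char.ofNat (48 + (PySem.Int.mod (d + 7) 10).toNat)]) := by
  have hdiv : PySem.Int.floordiv (w * 10 + d) 10 = w := by
    rw [PySem.Int.floordiv_eq_iff_of_pos (by norm_num)]
    constructor <;> nlinarith
  have hmod : PySem.Int.mod (w * 10 + d) 10 = d := by
    have := PySem.Int.floordiv_mul_add_mod (w * 10 + d) 10
    rw [hdiv] at this
    linarith
  unfold pvG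
  rw [hdiv, hmod]

-- a foldl over range that ignores the index is an iterate of pvG
theorem pv_foldl_g (l : List Nat) (st : Int × List Char) :
    l.foldl (fun s (_ : Nat) => pvG s) st = pvG^[l.length] st := by
  induction l generalizing st with
  | nil => rfl
  | cons x l ih => simp [List.foldl_cons, ih, Function.iterate_succ_apply]

-- peeling cs.length digits off the Horner value yields the decoded characters reversed
theorem pv_peel (cs : List Char) (h : ∀ x ∈ cs, PySem.Chars.isdigit x = true) (acc : List Char) :
    pvG^[cs.length] (pvVal cs, acc) = (0, acc ++ (cs.map pvPhi).reverse) := by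
  induction cs using List.reverseRecOn generalizing acc with
  | nil => simp [pvVal]
  | append_singleton cs c ih =>
    have h' : ∀ x ∈ cs, PySem.Chars.isdigit x = true := fun x hx => h x (by simp [hx])
    have hc : PySem.Chars.isdigit c = true := h c (by simp)
    have hb := pvDigit_bounds c hc
    rw [List.length_append, List.length_singleton, Function.iterate_succ_apply,
        pvVal_append, pvG_step _ _ _ (pvVal_nonneg cs h') hb.1 hb.2, ih h']
    simp [pvPhi]

-- ===== VERDICT (by name: the statement is the Claim_ definition above) =====
theorem decode_password_spec : Claim_equal_decode_password := by
  intro password _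
  unfold Spec_decode_password decode_password decode_password_alt
  by_cases hg : password.toList.length ≠ 8 ∨ ¬ pyStrIsdigit password.toList
  · rw [if_pos hg, if_pos hg]
  · rw [if_neg hg, if_neg hg]
    push Not at hg
    have hall : ∀ x ∈ password.toList, PySem.Chars.isdigit x = true := by
      have := hg.2
      simp [pyStrIsdigit, Bool.and_eq_true, List.all_eq_true] at this
      exact this.2
    have hlam : (fun (st : Int × List Char) (_ : Nat) =>
        (PySem.Int.floordiv st.1 10,
         st.2 ++ [Char.ofNat (48 + (PySem.Int.mod (PySem.Int.mod st.1 10 + 7) 10).toNat)]))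
        = fun s (_ : Nat) => pvG s := rfl
    have hval : password.toList.foldl (fun n ch => n * 10 + ((ch.toNat : Int) - 48)) 0
        = pvVal password.toList := rfl
    rw [pv_fold_eq _ hall []]
    simp only [hlam, hval, pv_foldl_g, List.length_range]
    rw [← hg.1, pv_peel _ hall]
    simp
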